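-- pv_equiv track=rewrite | github.com/theXYZT/codejam-2019 | Round 1A/alien-rhyme.py | largest_subset_size
-- ===== SOURCE A (Python) =====
-- from collections import defaultdict, Counter
--
-- def largest_subset_size(N, words):
--     word_dict = defaultdict(Counter)
--     for word in words:
--         word_dict[len(word)][word] += 1
--
--     max_length = max(len(word) for word in words)
--
--     result = 0
--     for length in range(max_length, 0, -1):
--         for (suffix, count) in word_dict[length].items():
--             if count >= 2:
--                 result += 2
--                 count -= 2
--             if count:
--                 word_dict[length - 1][suffix[1:]] += count
--     return result
-- ===== SOURCE B (Python) =====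
-- def largest_subset_size(N, words):
--     rev = [w[::-1] for w in words]
--
--     def solve(group, d):
--         # group: reversed words sharing a common first-d-char prefix (= common suffix)
--         leftover = 0
--         buckets = {}
--         for w in group:
--             if len(w) == d:
--                 leftover += 1
--             else:
--                 buckets.setdefault(w[d], []).append(w)
--         pairs = 0
--         for g in buckets.values():
--             p, l = solve(g, d + 1)
--             pairs += p
--             leftover += l
--         if d > 0 and leftover >= 2:
--             pairs += 2
--             leftover -= 2
--         return pairs, leftover
--
--     return solve(rev, 0)[0]
-- ===== Notes on version B (the rewrite author's own statement) =====
-- stated objective: alternative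
-- what changed: A counts suffixes level-by-level in per-length Counters, slicing a new suffix string for every carried count; B instead does one recursive DFS over the implicit trie of reversed words, bucketing each group by the character at the current depth (no string copies) and pairing leftovers bottom-up.
import Mathlib
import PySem

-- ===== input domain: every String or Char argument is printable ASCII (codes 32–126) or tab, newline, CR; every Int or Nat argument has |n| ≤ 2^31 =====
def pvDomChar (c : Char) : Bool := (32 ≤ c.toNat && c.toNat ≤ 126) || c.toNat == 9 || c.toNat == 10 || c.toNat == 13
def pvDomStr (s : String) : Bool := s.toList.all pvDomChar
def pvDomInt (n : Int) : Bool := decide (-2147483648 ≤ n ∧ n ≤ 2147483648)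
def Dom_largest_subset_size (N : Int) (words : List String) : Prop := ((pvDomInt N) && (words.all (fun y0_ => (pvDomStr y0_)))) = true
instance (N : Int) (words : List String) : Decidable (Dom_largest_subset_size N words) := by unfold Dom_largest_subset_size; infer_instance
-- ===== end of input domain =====

-- B replaces A's per-length Counter propagation (which re-slices suffix strings at every
-- level) by one DFS over the implicit trie of reversed words, pairing leftovers bottom-up.

-- ===== PORT A =====
-- `word_dict[len(word)][word] += 1` (defaultdict(Counter)); the defaultdict's side insertion
-- of an empty Counter on a plain read is unobservable through the returned value, so reads
-- are ported with `getD` (default = empty Counter / 0), exactly Python's resulting counts.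
def aStep (d : PySem.Dict Int (PySem.Dict String Int)) (w : String) :
    PySem.Dict Int (PySem.Dict String Int) :=
  d.modify (PySem.Str.len w) PySem.Dict.empty (fun c => c.modify w 0 (· + 1))

-- one iteration of `for (suffix, count) in word_dict[length].items()`
def aInner (length : Int) (st : PySem.Dict Int (PySem.Dict String Int) × Int)
    (p : String × Int) : PySem.Dict Int (PySem.Dict String Int) × Int :=
  let rc := if 2 ≤ p.2 then (st.2 + 2, p.2 - 2) else (st.2, p.2)
  if rc.2 ≠ 0 then
    (st.1.modify (length - 1) PySem.Dict.empty
      (fun c => c.modify (PySem.Str.slice p.1 (some 1) none) 0 (· + rc.2)), rc.1)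
  else (st.1, rc.1)

def aOuter (st : PySem.Dict Int (PySem.Dict String Int) × Int) (length : Int) :
    PySem.Dict Int (PySem.Dict String Int) × Int :=
  ((st.1.getD length PySem.Dict.empty).items).foldl (aInner length) st

def largest_subset_size (N : Int) (words : List String) : Int :=
  let wd := words.foldl aStep PySem.Dict.empty
  match PySem.List.max? (words.map (fun w => PySem.Str.len w)) (fun x => x) with
  | none => 0   -- Python: max() of an empty sequence raises ValueError; excluded by Pre_
  | some maxLength => ((PySem.List.pyRange maxLength 0 (-1)).foldl aOuter (wd, 0)).2

-- ===== PORT B =====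
-- loop body of the bucketing pass: `if len(w)==d: leftover+=1 else: buckets.setdefault(w[d],[]).append(w)`
def bCollect (d : Int) (st : Int × PySem.Dict Char (List String)) (w : String) :
    Int × PySem.Dict Char (List String) :=
  if PySem.Str.len w = d then (st.1 + 1, st.2)
  else
    match PySem.Str.pyGet? w d with
    | some c => (st.1, st.2.modify c [] (fun g => g ++ [w]))
    | none => st   -- unreachable from largest_subset_size_alt (Python would raise IndexError)

-- `solve(group, d)`; the extra Nat argument is a fuel guard making the recursion structural,
-- always sufficient at the call below (recursion depth is bounded by the longest word).
def bSolve : Nat → List String → Int → Int × Int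
  | 0, _, _ => (0, 0)
  | fuel+1, group, d =>
    let st := group.foldl (bCollect d) (0, PySem.Dict.empty)
    let pl := st.2.values.foldl
      (fun acc g =>
        let r := bSolve fuel g (d + 1)
        (acc.1 + r.1, acc.2 + r.2)) (0, st.1)
    if 0 < d ∧ 2 ≤ pl.2 then (pl.1 + 2, pl.2 - 2) else pl

def largest_subset_size_alt (N : Int) (words : List String) : Int :=
  let rev := words.map (fun w => (PySem.Str.slice? w none none (-1)).getD "")  -- w[::-1]
  let fuel := 1 + (words.map (fun w => w.toList.length)).sum
  (bSolve fuel rev 0).1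

-- ===== PRECONDITION & SPEC =====
-- Python A raises ValueError on the empty list (max() of an empty sequence); that is all Pre_ excludes.
def Pre_largest_subset_size (N : Int) (words : List String) : Prop := words ≠ []
instance (N : Int) (words : List String) : Decidable (Pre_largest_subset_size N words) := by
  unfold Pre_largest_subset_size; infer_instance
def pvWitness_largest_subset_size : Int × List String := (2, ["ab", "b"])

def Spec_largest_subset_size (N : Int) (words : List String) (out : Int) : Prop :=
  out = largest_subset_size_alt N words
instance (N : Int) (words : List String) (out : Int) :
    Decidable (Spec_largest_subset_size N words out) := by
  unfold Spec_largest_subset_size; infer_instance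

-- ===== CLAIM (what is proved, stated in full; the proofs are below) =====
def Claim_equal_largest_subset_size : Prop := ∀ (N : Int) (words : List String),
  Dom_largest_subset_size N words → Pre_largest_subset_size N words →
  Spec_largest_subset_size N words (largest_subset_size N words)

-- ===== LEMMAS AND PROOFS =====

-- ---------- the common specification ----------
-- Both programs pair words by shared suffixes; at every nonempty suffix `s` of the input,
-- with multiplicity v(s) = (#words equal to s) + leftovers carried from longer suffixes,
-- one pair (2 words) is taken whenever v(s) ≥ 2.  The answer is ∑ gain(v s).

def pvPos (n : Int) : Int := if 2 ≤ n then n - 2 else n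
def pvGain (n : Int) : Int := if 2 ≤ n then 2 else 0
def pvWs (words : List String) : List (List Char) := words.map String.toList
def pvChars (ws : List (List Char)) : Finset Char := ws.flatten.toFinset
def pvWc (ws : List (List Char)) (s : List Char) : Int := (ws.count s : Int)
def pvM (ws : List (List Char)) : Nat := ws.foldl (fun acc w => max acc w.length) 0
def pvCnt (ws : List (List Char)) : Nat → List Char → Int
  | 0, s => pvWc ws s
  | f+1, s => pvWc ws s + ∑ c ∈ pvChars ws, pvPos (pvCnt ws f (c :: s))
def pvV (ws : List (List Char)) (s : List Char) : Int := pvCnt ws (pvM ws) s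
def pvSfx (ws : List (List Char)) : Finset (List Char) := (ws.flatMap List.tails).toFinset.erase []

def pvSpec (ws : List (List Char)) : Int := ∑ t ∈ pvSfx ws, pvGain (pvV ws t)

-- tree-shaped (B-side) spec over a multiset of tails
def pvHeads (T : List (List Char)) : Finset Char := (T.filterMap List.head?).toFinset
def pvSub (T : List (List Char)) (c : Char) : List (List Char) :=
  (T.filter (fun t => t.head? == some c)).map List.tail
def pvLft : Nat → List (List Char) → Int
  | 0, T => (T.count [] : Int)
  | f+1, T => (T.count [] : Int) + ∑ c ∈ pvHeads T, pvPos (pvLft f (pvSub T c))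
def pvPrs : Nat → List (List Char) → Int
  | 0, _ => 0
  | f+1, T => ∑ c ∈ pvHeads T, (pvPrs f (pvSub T c) + pvGain (pvLft f (pvSub T c)))
def pvTails (ws : List (List Char)) (s : List Char) : List (List Char) :=
  (ws.filter (fun w => decide (s <:+ w))).map (fun w => (w.take (w.length - s.length)).reverse)

-- ---------- generic helpers ----------
theorem pv_sum_support {α : Type} [DecidableEq α] (S T : Finset α) (f : α → Int)
    (hS : ∀ x ∈ S, x ∉ T → f x = 0) (hT : ∀ x ∈ T, x ∉ S → f x = 0) :
    ∑ x ∈ S, f x = ∑ x ∈ T, f x := by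
  classical
  have h1 : ∑ x ∈ S, f x = ∑ x ∈ S ∪ T, f x :=
    Finset.sum_subset Finset.subset_union_left (fun x hx hxS => by
      rcases Finset.mem_union.mp hx with h | h
      · exact absurd h hxS
      · exact hT x h hxS)
  have h2 : ∑ x ∈ T, f x = ∑ x ∈ S ∪ T, f x :=
    Finset.sum_subset Finset.subset_union_right (fun x hx hxT => by
      rcases Finset.mem_union.mp hx with h | h
      · exact hS x h hxT
      · exact absurd h hxT)
  rw [h1, h2]

theorem pv_sum_keys {α : Type} [DecidableEq α] (l : List α) (hl : l.Nodup) (f : α → Int) :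
    (l.map f).sum = ∑ x ∈ l.toFinset, f x := by
  exact (List.sum_toFinset f hl).symm

theorem pv_suffix_cons_exists {s t : List Char} (h : s <:+ t) (hne : t ≠ s) :
    ∃ c, (c :: s) <:+ t := by
  obtain ⟨u, rfl⟩ := h
  have hu : u ≠ [] := by rintro rfl; simp at hne
  refine ⟨u.getLast hu, u.dropLast, ?_⟩
  conv_rhs => rw [← List.dropLast_append_getLast hu]
  simp

theorem pv_suffix_eq_of_length {l₁ l₂ t : List Char} (h₁ : l₁ <:+ t) (h₂ : l₂ <:+ t)
    (hl : l₁.length = l₂.length) : l₁ = l₂ := by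
  rcases List.suffix_or_suffix_of_suffix h₁ h₂ with h | h
  · exact h.eq_of_length hl
  · exact (h.eq_of_length hl.symm).symm

theorem pv_count_toList (words : List String) (s : String) :
    (pvWs words).count s.toList = words.count s := by
  have hinj : Function.Injective String.toList := fun a b h => by
    have := congrArg String.ofList h
    simpa [String.ofList_toList] using this
  simpa [pvWs] using List.count_map_of_injective words String.toList hinj s

-- ---------- spec-side facts ----------
theorem pv_len_le_M (ws : List (List Char)) (w : List Char) (hw : w ∈ ws) :
    w.length ≤ pvM ws := by
  exact (PySem.List.le_foldl_max_nat ws List.length 0).2 w hw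

theorem pv_M_le_sum (ws : List (List Char)) : pvM ws ≤ (ws.map List.length).sum := by
  suffices h : ∀ (l : List (List Char)) (acc : Nat),
      l.foldl (fun a w => max a w.length) acc ≤ acc + (l.map List.length).sum by
    simpa [pvM] using h ws 0
  intro l
  induction l with
  | nil => simp
  | cons w t ih =>
    intro acc
    simp only [List.foldl_cons, List.map_cons, List.sum_cons]
    have := ih (max acc w.length)
    omega

theorem pv_cnt_def (ws : List (List Char)) (f : Nat) (s : List Char) :
    pvCnt ws (f+1) s = pvWc ws s + ∑ c ∈ pvChars ws, pvPos (pvCnt ws f (c :: s)) := rfl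

theorem pv_cnt_vanish (ws : List (List Char)) (f : Nat) (s : List Char)
    (h : ∀ w ∈ ws, ¬ s <:+ w) : pvCnt ws f s = 0 := by
  induction f generalizing s with
  | zero =>
    simp only [pvCnt, pvWc]
    exact_mod_cast List.count_eq_zero.mpr (fun hmem => h s hmem (List.suffix_refl s))
  | succ f ih =>
    simp only [pvCnt]
    have hwc : pvWc ws s = 0 := by
      simp only [pvWc]
      exact_mod_cast List.count_eq_zero.mpr (fun hmem => h s hmem (List.suffix_refl s))
    rw [hwc, Finset.sum_eq_zero, add_zero]
    intro c _
    have : pvCnt ws f (c :: s) = 0 :=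
      ih (c :: s) (fun w hw hsfx => h w hw ((List.suffix_cons c s).trans hsfx))
    simp [this, pvPos]

theorem pv_mem_chars (ws : List (List Char)) (c : Char) (s w : List Char)
    (hw : w ∈ ws) (h : (c :: s) <:+ w) : c ∈ pvChars ws := by
  simp only [pvChars, List.mem_toFinset, List.mem_flatten]
  exact ⟨w, hw, h.sublist.subset (List.mem_cons_self)⟩

theorem pv_cnt_succ (ws : List (List Char)) (f : Nat) (s : List Char)
    (h : pvM ws ≤ f + s.length) : pvCnt ws (f+1) s = pvCnt ws f s := by
  induction f generalizing s with
  | zero =>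
    rw [pv_cnt_def, Finset.sum_eq_zero, add_zero]
    · rfl
    intro c _
    have hz : pvCnt ws 0 (c :: s) = 0 := by
      show pvWc ws (c :: s) = 0
      have hnm : (c :: s) ∉ ws := fun hmem => by
        have := pv_len_le_M ws (c :: s) hmem
        simp only [List.length_cons] at this
        omega
      simp only [pvWc]
      exact_mod_cast List.count_eq_zero.mpr hnm
    rw [hz]
    simp [pvPos]
  | succ f ih =>
    rw [pv_cnt_def, pv_cnt_def]
    congr 1
    refine Finset.sum_congr rfl (fun c _ => ?_)
    rw [ih (c :: s) (by simp only [List.length_cons]; omega)]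

theorem pv_cnt_stable (ws : List (List Char)) (f : Nat) (s : List Char)
    (h : pvM ws ≤ f + s.length) : pvCnt ws f s = pvV ws s := by
  have aux : ∀ (g k : Nat), pvM ws ≤ g + s.length → pvCnt ws (g + k) s = pvCnt ws g s := by
    intro g k hg
    induction k with
    | zero => rfl
    | succ k ih =>
      rw [show g + (k + 1) = (g + k) + 1 by omega, pv_cnt_succ ws (g + k) s (by omega), ih]
  unfold pvV
  rcases le_total f (pvM ws) with hf | hf
  · rw [show pvM ws = f + (pvM ws - f) by omega, aux f (pvM ws - f) h]
  · rw [show f = pvM ws + (f - pvM ws) by omega, aux (pvM ws) (f - pvM ws) (by omega)]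

theorem pv_V_unfold (ws : List (List Char)) (s : List Char) :
    pvV ws s = pvWc ws s + ∑ c ∈ pvChars ws, pvPos (pvV ws (c :: s)) := by
  rcases hM : pvM ws with _ | g
  · have hch : pvChars ws = ∅ := by
      apply Finset.eq_empty_of_forall_notMem
      intro c hc
      simp only [pvChars, List.mem_toFinset, List.mem_flatten] at hc
      obtain ⟨w, hw, hcw⟩ := hc
      have hlen := pv_len_le_M ws w hw
      rw [hM] at hlen
      have hw0 : w = [] := List.eq_nil_of_length_eq_zero (by omega)
      rw [hw0] at hcw
      simp at hcw
    unfold pvV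
    rw [hM]
    simp [pvCnt, hch]
  · unfold pvV
    rw [hM, pv_cnt_def]
    congr 1
    refine Finset.sum_congr rfl (fun c _ => ?_)
    have := pv_cnt_stable ws g (c :: s) (by rw [hM]; simp only [List.length_cons]; omega)
    rw [this]
    unfold pvV
    rw [hM]

theorem pv_mem_sfx (ws : List (List Char)) (t : List Char) :
    t ∈ pvSfx ws ↔ t ≠ [] ∧ ∃ w ∈ ws, t <:+ w := by
  simp only [pvSfx, Finset.mem_erase, List.mem_toFinset, List.mem_flatMap, List.mem_tails]

-- ---------- tails (tree) side ----------
-- pointwise facts about one word's tail at node s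
theorem pv_tkrev_head (w s : List Char) (c : Char) (hs : s <:+ w) :
    ((w.take (w.length - s.length)).reverse.head? = some c) ↔ (c :: s) <:+ w := by
  obtain ⟨u, rfl⟩ := hs
  have hlen : (u ++ s).length - s.length = u.length := by simp
  rw [hlen, List.take_left, List.head?_reverse, List.getLast?_eq_some_iff]
  constructor
  · rintro ⟨u', rfl⟩
    exact ⟨u', by simp⟩
  · rintro ⟨v, hv⟩
    have h2 : (v ++ [c]) ++ s = u ++ s := by simpa using hv
    exact ⟨v, (List.append_cancel_right h2).symm⟩

theorem pv_tkrev_tail (w s : List Char) (c : Char) (h : (c :: s) <:+ w) :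
    ((w.take (w.length - s.length)).reverse).tail =
      (w.take (w.length - (s.length + 1))).reverse := by
  obtain ⟨v, rfl⟩ := h
  have h1 : (v ++ c :: s).length - s.length = (v ++ [c]).length := by simp; omega
  have h2 : (v ++ c :: s).length - (s.length + 1) = v.length := by simp
  rw [h1, h2]
  have e1 : (v ++ c :: s).take (v ++ [c]).length = v ++ [c] := by
    rw [show v ++ c :: s = (v ++ [c]) ++ s by simp, List.take_left]
  have e2 : (v ++ c :: s).take v.length = v := List.take_left
  rw [e1, e2]
  simp

theorem pv_tkrev_nil (w s : List Char) (hs : s <:+ w) :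
    ((w.take (w.length - s.length)).reverse = []) ↔ w = s := by
  obtain ⟨u, rfl⟩ := hs
  have hlen : (u ++ s).length - s.length = u.length := by simp
  rw [hlen, List.take_left]
  simp

theorem pv_lft_def (f : Nat) (T : List (List Char)) :
    pvLft (f+1) T = (T.count [] : Int) + ∑ c ∈ pvHeads T, pvPos (pvLft f (pvSub T c)) := rfl

theorem pv_prs_def (f : Nat) (T : List (List Char)) :
    pvPrs (f+1) T = ∑ c ∈ pvHeads T, (pvPrs f (pvSub T c) + pvGain (pvLft f (pvSub T c))) := rfl

theorem pv_tails_nil (ws : List (List Char)) : pvTails ws [] = ws.map List.reverse := by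
  unfold pvTails
  rw [List.filter_eq_self.mpr (fun w _ => by simp [List.nil_suffix])]
  refine List.map_congr_left (fun w _ => ?_)
  simp [List.take_length]

theorem pv_sub_tails (ws : List (List Char)) (s : List Char) (c : Char) :
    pvSub (pvTails ws s) c = pvTails ws (c :: s) := by
  unfold pvSub pvTails
  rw [List.filter_map, List.map_map, List.filter_filter]
  have hfil : ∀ w ∈ ws,
      (((fun t => t.head? == some c) ∘ fun w => (w.take (w.length - s.length)).reverse) w &&
        decide (s <:+ w)) = decide ((c :: s) <:+ w) := by
    intro w _
    by_cases hsw : s <:+ w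
    · have hiff := pv_tkrev_head w s c hsw
      by_cases h2 : (c :: s) <:+ w
      · simp [hsw, h2, hiff.mpr h2]
      · have hne : ¬ ((w.take (w.length - s.length)).reverse.head? = some c) :=
          fun hh => h2 (hiff.mp hh)
        have hne' : ¬ ((w.take (w.length - s.length)).getLast? = some c) := by
          rw [← List.head?_reverse]; exact hne
        simp [hsw, h2, hne']
    · have h2 : ¬ ((c :: s) <:+ w) := fun h => hsw ((List.suffix_cons c s).trans h)
      simp [hsw, h2]
  rw [List.filter_congr hfil]
  refine List.map_congr_left (fun w hw => ?_)
  have hcw : (c :: s) <:+ w := of_decide_eq_true ((List.mem_filter.mp hw).2)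
  have := pv_tkrev_tail w s c hcw
  simp only [Function.comp_apply, List.length_cons]
  exact this

theorem pv_count_nil_tails (ws : List (List Char)) (s : List Char) :
    ((pvTails ws s).count [] : Int) = pvWc ws s := by
  unfold pvTails pvWc
  have hnat : List.count ([] : List Char)
      ((ws.filter (fun w => decide (s <:+ w))).map
        (fun w => (w.take (w.length - s.length)).reverse)) = List.count s ws := by
    rw [List.count_eq_countP, List.count_eq_countP, List.countP_map, List.countP_filter]
    refine List.countP_congr (fun w _ => ?_)
    constructor
    · intro h
      simp only [Function.comp, Bool.and_eq_true, beq_iff_eq, decide_eq_true_eq] at h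
      obtain ⟨hnil, hsw⟩ := h
      have := (pv_tkrev_nil w s hsw).mp hnil
      simp [this]
    · intro h
      simp only [beq_iff_eq] at h
      subst h
      simp only [Function.comp, Bool.and_eq_true, beq_iff_eq, decide_eq_true_eq]
      exact ⟨(pv_tkrev_nil w w (List.suffix_refl w)).mpr rfl, List.suffix_refl w⟩
  exact_mod_cast congrArg (Nat.cast : Nat → Int) hnat

theorem pv_heads_tails (ws : List (List Char)) (s : List Char) (c : Char) :
    c ∈ pvHeads (pvTails ws s) ↔ ∃ w ∈ ws, (c :: s) <:+ w := by
  simp only [pvHeads, List.mem_toFinset, List.mem_filterMap]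
  constructor
  · rintro ⟨t, ht, hh⟩
    simp only [pvTails, List.mem_map, List.mem_filter] at ht
    obtain ⟨w, ⟨hw, hsw⟩, rfl⟩ := ht
    exact ⟨w, hw, (pv_tkrev_head w s c (of_decide_eq_true hsw)).mp hh⟩
  · rintro ⟨w, hw, hc⟩
    have hsw : s <:+ w := (List.suffix_cons c s).trans hc
    refine ⟨(w.take (w.length - s.length)).reverse, ?_, (pv_tkrev_head w s c hsw).mpr hc⟩
    simp only [pvTails, List.mem_map, List.mem_filter]
    exact ⟨w, ⟨hw, decide_eq_true hsw⟩, rfl⟩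

theorem pv_lft_tails (ws : List (List Char)) (f : Nat) (s : List Char) :
    pvLft f (pvTails ws s) = pvCnt ws f s := by
  induction f generalizing s with
  | zero => exact pv_count_nil_tails ws s
  | succ f ih =>
    rw [pv_lft_def, pv_cnt_def, pv_count_nil_tails ws s]
    congr 1
    have hstep : ∀ c ∈ pvHeads (pvTails ws s),
        pvPos (pvLft f (pvSub (pvTails ws s) c)) = pvPos (pvCnt ws f (c :: s)) := by
      intro c _
      rw [pv_sub_tails, ih]
    rw [Finset.sum_congr rfl hstep]
    refine Finset.sum_subset ?_ ?_
    · intro c hc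
      obtain ⟨w, hw, hcw⟩ := (pv_heads_tails ws s c).mp hc
      exact pv_mem_chars ws c s w hw hcw
    · intro c _ hnc
      have hz : pvCnt ws f (c :: s) = 0 := by
        refine pv_cnt_vanish ws f (c :: s) (fun w hw hcw => hnc ?_)
        exact (pv_heads_tails ws s c).mpr ⟨w, hw, hcw⟩
      simp [hz, pvPos]

theorem pv_prs_tails (ws : List (List Char)) (f : Nat) (s : List Char)
    (h : pvM ws ≤ f + s.length) :
    pvPrs f (pvTails ws s) =
      ∑ t ∈ (pvSfx ws).filter (fun t => s <:+ t ∧ t ≠ s), pvGain (pvV ws t) := by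
  induction f generalizing s with
  | zero =>
    have hemp : (pvSfx ws).filter (fun t => s <:+ t ∧ t ≠ s) = ∅ := by
      refine Finset.filter_eq_empty_iff.mpr ?_
      rintro t htm ⟨hst, hts⟩
      obtain ⟨htne, w, hw, htw⟩ := (pv_mem_sfx ws t).mp htm
      have h1 : t.length ≤ w.length := htw.length_le
      have h2 : w.length ≤ pvM ws := pv_len_le_M ws w hw
      have h3 : s.length ≤ t.length := hst.length_le
      exact hts ((hst.eq_of_length (by omega)).symm)
    rw [hemp]
    simp [pvPrs]
  | succ f ih =>
    rw [pv_prs_def]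
    have hterm : ∀ c ∈ pvHeads (pvTails ws s),
        pvPrs f (pvSub (pvTails ws s) c) + pvGain (pvLft f (pvSub (pvTails ws s) c)) =
        ∑ t ∈ (pvSfx ws).filter (fun t => (c :: s) <:+ t), pvGain (pvV ws t) := by
      intro c hc
      rw [pv_sub_tails, pv_lft_tails,
          pv_cnt_stable ws f (c :: s) (by simp only [List.length_cons]; omega),
          ih (c :: s) (by simp only [List.length_cons]; omega)]
      have hmemsfx : (c :: s) ∈ pvSfx ws := by
        obtain ⟨w, hw, hcw⟩ := (pv_heads_tails ws s c).mp hc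
        exact (pv_mem_sfx ws (c :: s)).mpr ⟨List.cons_ne_nil c s, w, hw, hcw⟩
      have hsplit : (pvSfx ws).filter (fun t => (c :: s) <:+ t) =
          insert (c :: s) ((pvSfx ws).filter (fun t => (c :: s) <:+ t ∧ t ≠ (c :: s))) := by
        ext t
        simp only [Finset.mem_filter, Finset.mem_insert]
        constructor
        · rintro ⟨hts, hsuf⟩
          by_cases h : t = c :: s
          · exact Or.inl h
          · exact Or.inr ⟨hts, hsuf, h⟩
        · rintro (rfl | ⟨hts, hsuf, _⟩)
          · exact ⟨hmemsfx, List.suffix_refl _⟩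
          · exact ⟨hts, hsuf⟩
      rw [hsplit, Finset.sum_insert (by simp [Finset.mem_filter])]
      ring
    rw [Finset.sum_congr rfl hterm]
    have hdisj : (↑(pvHeads (pvTails ws s)) : Set Char).PairwiseDisjoint
        (fun c => (pvSfx ws).filter (fun t => (c :: s) <:+ t)) := by
      intro c₁ _ c₂ _ hne
      refine Finset.disjoint_left.mpr (fun t ht₁ ht₂ => ?_)
      have h₁ := (Finset.mem_filter.mp ht₁).2
      have h₂ := (Finset.mem_filter.mp ht₂).2
      have : (c₁ :: s) = (c₂ :: s) := pv_suffix_eq_of_length h₁ h₂ (by simp)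
      exact hne (by injection this)
    rw [← Finset.sum_biUnion hdisj]
    congr 1
    ext t
    simp only [Finset.mem_biUnion, Finset.mem_filter]
    constructor
    · rintro ⟨c, hc, htm, hsuf⟩
      refine ⟨htm, (List.suffix_cons c s).trans hsuf, fun h => ?_⟩
      have := hsuf.length_le
      subst h
      simp at this
    · rintro ⟨htm, hst, hts⟩
      obtain ⟨c, hcs⟩ := pv_suffix_cons_exists hst hts
      obtain ⟨_, w, hw, htw⟩ := (pv_mem_sfx ws t).mp htm
      exact ⟨c, (pv_heads_tails ws s c).mpr ⟨w, hw, hcs.trans htw⟩, htm, hcs⟩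

theorem pv_prs_root (ws : List (List Char)) (f : Nat) (h : pvM ws ≤ f) :
    pvPrs f (ws.map List.reverse) = pvSpec ws := by
  rw [← pv_tails_nil, pv_prs_tails ws f [] (by simpa using h)]
  unfold pvSpec
  congr 1
  refine Finset.filter_true_of_mem (fun t ht => ?_)
  exact ⟨List.nil_suffix, ((pv_mem_sfx ws t).mp ht).1⟩

-- ---------- B implementation = tree spec ----------
theorem pv_toFinset_ofList {α : Type} [DecidableEq α] [BEq α] [LawfulBEq α] (l : List α) :
    (PySem.Set.ofList l).toFinset = l.toFinset := by
  ext x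
  simp [List.mem_toFinset, PySem.Set.mem_ofList]

theorem pv_filterMap_head (group : List String) (d : Nat)
    (hlen : ∀ w ∈ group, d ≤ w.toList.length) :
    (group.map (fun w => w.toList.drop d)).filterMap List.head? =
      (group.filter (fun w => decide (¬ PySem.Str.len w = (d : Int)))).map
        (fun w => w.toList.getD d ' ') := by
  induction group with
  | nil => rfl
  | cons w t iht =>
    have hw := hlen w List.mem_cons_self
    have hrest := iht (fun u hu => hlen u (List.mem_cons_of_mem _ hu))
    simp only [List.map_cons, List.filterMap_cons, List.filter_cons]
    by_cases h : w.toList.length = d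
    · have hd : (w.toList.drop d).head? = none := by
        rw [List.head?_drop]
        exact List.getElem?_eq_none (by omega)
      have hflt : (decide (¬ PySem.Str.len w = (d : Int))) = false := by
        simp [PySem.Str.len_eq, h]
      rw [hd, hflt, hrest]
      simp
    · have hdlt : d < w.toList.length := by omega
      have hd : (w.toList.drop d).head? = some (w.toList.getD d ' ') := by
        rw [List.head?_drop, List.getElem?_eq_getElem hdlt, List.getD_eq_getElem _ _ hdlt]
      have hflt : (decide (¬ PySem.Str.len w = (d : Int))) = true := by
        simp only [PySem.Str.len_eq, decide_eq_true_eq]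
        exact_mod_cast h
      rw [hd, hflt, hrest]
      simp

theorem pv_bucket_sub (group : List String) (d : Nat)
    (hlen : ∀ w ∈ group, d ≤ w.toList.length) (c : Char) :
    pvSub (group.map (fun w => w.toList.drop d)) c =
      ((group.filter (fun w => decide (¬ PySem.Str.len w = (d : Int)))).filter
        (fun w => w.toList.getD d ' ' == c)).map (fun w => w.toList.drop (d + 1)) := by
  unfold pvSub
  rw [List.filter_map, List.map_map, List.filter_filter]
  have hfil : ∀ w ∈ group,
      (((fun t => t.head? == some c) ∘ fun w => w.toList.drop d) w) =
        ((w.toList.getD d ' ' == c) && decide (¬ PySem.Str.len w = (d : Int))) := by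
    intro w hw
    have hwl := hlen w hw
    by_cases h : w.toList.length = d
    · have hd : (w.toList.drop d).head? = none := by
        rw [List.head?_drop]
        exact List.getElem?_eq_none (by omega)
      have hflt : (decide (¬ PySem.Str.len w = (d : Int))) = false := by
        simp [PySem.Str.len_eq, h]
      simp only [Function.comp_apply, hd, hflt, Bool.and_false]
      rfl
    · have hdlt : d < w.toList.length := by omega
      have hd : (w.toList.drop d).head? = some (w.toList.getD d ' ') := by
        rw [List.head?_drop, List.getElem?_eq_getElem hdlt, List.getD_eq_getElem _ _ hdlt]
      have hflt : (decide (¬ PySem.Str.len w = (d : Int))) = true := by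
        simp only [PySem.Str.len_eq, decide_eq_true_eq]
        exact_mod_cast h
      simp only [Function.comp_apply, hd, hflt, Bool.and_true]
      rfl
  rw [List.filter_congr hfil]
  have htail : (List.tail ∘ fun w : String => w.toList.drop d) = fun w : String => w.toList.drop (d + 1) :=
    funext (fun w => List.tail_drop)
  rw [htail]

theorem pv_bsolve_spec (f : Nat) (group : List String) (d : Nat)
    (hlen : ∀ w ∈ group, d ≤ w.toList.length)
    (hfuel : ∀ w ∈ group, w.toList.length < d + f) :
    bSolve f group (d : Int) =
      (pvPrs f (group.map (fun w => w.toList.drop d)) +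
        (if 0 < d then pvGain (pvLft f (group.map (fun w => w.toList.drop d))) else 0),
       if 0 < d then pvPos (pvLft f (group.map (fun w => w.toList.drop d)))
       else pvLft f (group.map (fun w => w.toList.drop d))) := by
  induction f generalizing group d with
  | zero =>
    have hg : group = [] := by
      refine List.eq_nil_iff_forall_not_mem.mpr (fun w hw => ?_)
      have h1 := hlen w hw
      have h2 := hfuel w hw
      omega
    subst hg
    simp [bSolve, pvPrs, pvLft, pvPos, pvGain]
  | succ f ih =>
    have hsplit : ∀ (l : List String) (a : Int) (b : PySem.Dict Char (List String)),
        l.foldl (bCollect (d : Int)) (a, b) =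
          (l.foldl (fun x w => if PySem.Str.len w = (d : Int) then x + 1 else x) a,
           l.foldl (fun bk w => if PySem.Str.len w = (d : Int) then bk
             else match PySem.Str.pyGet? w (d : Int) with
               | some c => bk.modify c [] (fun g => g ++ [w])
               | none => bk) b) := by
      intro l
      induction l with
      | nil => intro a b; rfl
      | cons w t iht =>
        intro a b
        simp only [List.foldl_cons]
        have hstep : bCollect (d : Int) (a, b) w =
            (if PySem.Str.len w = (d : Int) then a + 1 else a,
             if PySem.Str.len w = (d : Int) then b
             else match PySem.Str.pyGet? w (d : Int) with
               | some c => b.modify c [] (fun g => g ++ [w])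
               | none => b) := by
          by_cases hw : PySem.Str.len w = (d : Int)
          · simp only [bCollect, if_pos hw]
          · simp only [bCollect, if_neg hw]
            cases hg : PySem.Str.pyGet? w (d : Int) <;> rfl
        rw [hstep, iht]
    have hcnt : group.foldl (fun x w => if PySem.Str.len w = (d : Int) then x + 1 else x) (0 : Int)
        = ((group.map (fun w => w.toList.drop d)).count [] : Int) := by
      rw [PySem.List.foldl_ite_add_one (fun w => PySem.Str.len w = (d : Int)) group 0, zero_add]
      rw [List.count_eq_countP, List.countP_map]
      norm_cast
      refine List.countP_congr (fun w hw => ?_)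
      have hwl := hlen w hw
      by_cases h : w.toList.length = d
      · simp [PySem.Str.len_eq, h, Function.comp, List.drop_eq_nil_iff]
      · have h1 : (decide (PySem.Str.len w = (d : Int))) = false := by
          simp only [PySem.Str.len_eq, decide_eq_false_iff_not]
          exact_mod_cast h
        have h2 : w.toList.drop d ≠ [] := by
          rw [ne_eq, List.drop_eq_nil_iff]
          omega
        simp only [Function.comp, h1, beq_iff_eq, Bool.false_eq_true, false_iff]
        exact h2
    have hG : ∀ bk : PySem.Dict Char (List String), group.foldl (fun bk w => if PySem.Str.len w = (d : Int) then bk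
             else match PySem.Str.pyGet? w (d : Int) with
               | some c => bk.modify c [] (fun g => g ++ [w])
               | none => bk) bk =
        (group.filter (fun w => decide (¬ PySem.Str.len w = (d : Int)))).foldl
          (fun bk w => bk.modify (w.toList.getD d ' ') [] (fun g => g ++ [w])) bk := by
      intro bk
      rw [← PySem.List.foldl_ite_eq_foldl_filter (fun w => ¬ PySem.Str.len w = (d : Int)) _ group bk]
      apply PySem.List.foldl_congr_mem
      intro acc w hw
      by_cases h : PySem.Str.len w = (d : Int)
      · rw [if_pos h, if_neg (not_not_intro h)]
      · have hne : w.toList.length ≠ d := by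
          intro he
          exact h (by rw [PySem.Str.len_eq, he])
        have hdlt : d < w.toList.length := by
          have := hlen w hw
          omega
        have hpg : PySem.Str.pyGet? w (d : Int) = some (w.toList.getD d ' ') := by
          rw [PySem.Str.pyGet?_eq]
          rw [show PySem.Chars.pyGet? w.toList (d : Int) = w.toList[(d : Nat)]? from
            PySem.List.pyGet?_natCast w.toList d]
          rw [List.getElem?_eq_getElem hdlt, List.getD_eq_getElem _ _ hdlt]
        rw [if_neg h, if_pos h, hpg]
    have hkeys : ((group.filter (fun w => decide (¬ PySem.Str.len w = (d : Int)))).foldl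
          (fun bk w => bk.modify (w.toList.getD d ' ') [] (fun g => g ++ [w]))
          (PySem.Dict.empty : PySem.Dict Char (List String))).keys =
        PySem.Set.ofList ((group.filter (fun w => decide (¬ PySem.Str.len w = (d : Int)))).map
          (fun w => w.toList.getD d ' ')) := by
      have hk := PySem.Dict.keys_foldl_modify_key
        (group.filter (fun w => decide (¬ PySem.Str.len w = (d : Int))))
        (fun w : String => w.toList.getD d ' ') ([] : List String)
        (fun _ w => fun g => g ++ [w]) (PySem.Dict.empty : PySem.Dict Char (List String))
      exact hk.trans (by rw [PySem.Dict.keys_empty]; exact PySem.Set.update_empty _)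
    have hnodup : ((group.filter (fun w => decide (¬ PySem.Str.len w = (d : Int)))).foldl
          (fun bk w => bk.modify (w.toList.getD d ' ') [] (fun g => g ++ [w]))
          (PySem.Dict.empty : PySem.Dict Char (List String))).keys.Nodup := by
      rw [hkeys]
      exact PySem.Set.nodup_ofList _
    have hgetD : ∀ c : Char,
        ((group.filter (fun w => decide (¬ PySem.Str.len w = (d : Int)))).foldl
          (fun bk w => bk.modify (w.toList.getD d ' ') [] (fun g => g ++ [w]))
          (PySem.Dict.empty : PySem.Dict Char (List String))).getD c [] =
        (group.filter (fun w => decide (¬ PySem.Str.len w = (d : Int)))).filter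
          (fun w => w.toList.getD d ' ' == c) := by
      intro c
      rw [show (group.filter (fun w => decide (¬ PySem.Str.len w = (d : Int)))).foldl
            (fun bk w => bk.modify (w.toList.getD d ' ') [] (fun g => g ++ [w]))
            (PySem.Dict.empty : PySem.Dict Char (List String)) =
          ((group.filter (fun w => decide (¬ PySem.Str.len w = (d : Int)))).map
            (fun w => (w.toList.getD d ' ', w))).foldl
            (fun bk p => bk.modify p.1 [] (fun g => g ++ [p.2])) PySem.Dict.empty from
        (List.foldl_map (f := fun w : String => (w.toList.getD d ' ', w))
          (g := fun (bk : PySem.Dict Char (List String)) (p : Char × String) =>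
            bk.modify p.1 [] (fun g => g ++ [p.2]))).symm]
      rw [PySem.Dict.getD_foldl_modify_append, PySem.Dict.getD_empty, List.nil_append,
        List.filter_map, List.map_map]
      simp [Function.comp_def]
    have hunfold : bSolve (f+1) group (d : Int) =
        (let pl := ((group.foldl (bCollect (d : Int)) ((0 : Int), PySem.Dict.empty)).2).values.foldl
            (fun acc g => (acc.1 + (bSolve f g ((d : Int) + 1)).1, acc.2 + (bSolve f g ((d : Int) + 1)).2))
            ((0 : Int), (group.foldl (bCollect (d : Int)) ((0 : Int), PySem.Dict.empty)).1);
         if 0 < (d : Int) ∧ 2 ≤ pl.2 then (pl.1 + 2, pl.2 - 2) else pl) := rfl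
    rw [hunfold, hsplit group 0 PySem.Dict.empty]
    dsimp only
    rw [hG, hcnt, PySem.Dict.values_eq_map_keys _ hnodup [], hkeys, List.foldl_map]
    rw [PySem.List.foldl_prod_mk
      (f := fun a c => a + (bSolve f
        (((group.filter (fun w => decide (¬ PySem.Str.len w = (d : Int)))).foldl
          (fun bk w => bk.modify (w.toList.getD d ' ') [] (fun g => g ++ [w]))
          (PySem.Dict.empty : PySem.Dict Char (List String))).getD c []) ((d : Int) + 1)).1)
      (g := fun a c => a + (bSolve f
        (((group.filter (fun w => decide (¬ PySem.Str.len w = (d : Int)))).foldl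
          (fun bk w => bk.modify (w.toList.getD d ' ') [] (fun g => g ++ [w]))
          (PySem.Dict.empty : PySem.Dict Char (List String))).getD c []) ((d : Int) + 1)).2)]
    rw [PySem.List.foldl_add, PySem.List.foldl_add]
    have hIH : ∀ c : Char, bSolve f
        (((group.filter (fun w => decide (¬ PySem.Str.len w = (d : Int)))).foldl
          (fun bk w => bk.modify (w.toList.getD d ' ') [] (fun g => g ++ [w]))
          (PySem.Dict.empty : PySem.Dict Char (List String))).getD c []) ((d : Int) + 1) =
        (pvPrs f (pvSub (group.map (fun w => w.toList.drop d)) c) +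
          pvGain (pvLft f (pvSub (group.map (fun w => w.toList.drop d)) c)),
         pvPos (pvLft f (pvSub (group.map (fun w => w.toList.drop d)) c))) := by
      intro c
      rw [hgetD c]
      have hlen' : ∀ w ∈ (group.filter (fun w => decide (¬ PySem.Str.len w = (d : Int)))).filter
          (fun w => w.toList.getD d ' ' == c), (d + 1) ≤ w.toList.length := by
        intro w hw
        have hw1 := List.mem_filter.mp hw
        have hw2 := List.mem_filter.mp hw1.1
        have hne : w.toList.length ≠ d := by
          have := of_decide_eq_true hw2.2
          intro he
          exact this (by rw [PySem.Str.len_eq, he])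
        have := hlen w hw2.1
        omega
      have hfuel' : ∀ w ∈ (group.filter (fun w => decide (¬ PySem.Str.len w = (d : Int)))).filter
          (fun w => w.toList.getD d ' ' == c), w.toList.length < (d + 1) + f := by
        intro w hw
        have hw1 := List.mem_filter.mp hw
        have hw2 := List.mem_filter.mp hw1.1
        have := hfuel w hw2.1
        omega
      have hcast : ((d : Int) + 1) = ((d + 1 : Nat) : Int) := by push_cast; ring
      rw [hcast, ih _ (d + 1) hlen' hfuel', if_pos (Nat.succ_pos d), if_pos (Nat.succ_pos d),
        ← pv_bucket_sub group d hlen c]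
    simp only [hIH]
    rw [pv_sum_keys _ (PySem.Set.nodup_ofList _), pv_sum_keys _ (PySem.Set.nodup_ofList _)]
    have hfin : ((group.filter (fun w => decide (¬ PySem.Str.len w = (d : Int)))).map
        (fun w => w.toList.getD d ' ')).toFinset =
        pvHeads (group.map (fun w => w.toList.drop d)) := by
      unfold pvHeads
      rw [pv_filterMap_head group d hlen]
    rw [pv_toFinset_ofList, hfin, zero_add, ← pv_prs_def, ← pv_lft_def]
    rcases Nat.eq_zero_or_pos d with hd | hd
    · subst hd
      norm_num
    · have hdi : (0 : Int) < (d : Int) := by exact_mod_cast hd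
      by_cases h2 : 2 ≤ pvLft (f + 1) (group.map (fun w => w.toList.drop d))
      · rw [if_pos ⟨hdi, h2⟩, if_pos hd, if_pos hd]
        simp [pvGain, pvPos, h2]
      · rw [if_neg (fun hc => h2 hc.2), if_pos hd, if_pos hd]
        simp [pvGain, pvPos, h2]

theorem pv_alt_eq_spec (N : Int) (words : List String) :
    largest_subset_size_alt N words = pvSpec (pvWs words) := by
  have hrev : words.map (fun w => (PySem.Str.slice? w none none (-1)).getD "") =
      words.map (fun w => String.ofList w.toList.reverse) :=
    List.map_congr_left (fun w _ => by rw [PySem.Str.slice?_none_none_neg_one]; rfl)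
  show (bSolve (1 + (words.map (fun w => w.toList.length)).sum)
      (words.map (fun w => (PySem.Str.slice? w none none (-1)).getD "")) 0).1 = _
  rw [hrev, show (0 : Int) = ((0 : Nat) : Int) by norm_num]
  rw [pv_bsolve_spec (1 + (words.map (fun w => w.toList.length)).sum)
      (words.map (fun w => String.ofList w.toList.reverse)) 0
      (fun w _ => Nat.zero_le _)
      (fun w' hw' => by
        obtain ⟨w, hw, rfl⟩ := List.mem_map.mp hw'
        have h1 : (String.ofList w.toList.reverse).toList.length = w.toList.length := by
          rw [String.toList_ofList, List.length_reverse]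
        have h2 : w.toList.length ≤ (words.map (fun w => w.toList.length)).sum :=
          List.le_sum_of_mem (List.mem_map.mpr ⟨w, hw, rfl⟩)
        omega)]
  have hT : (words.map (fun w => String.ofList w.toList.reverse)).map
      (fun w => w.toList.drop 0) = (pvWs words).map List.reverse := by
    rw [List.map_map]
    unfold pvWs
    rw [List.map_map]
    exact List.map_congr_left (fun w _ => by simp)
  rw [hT]
  have hM : pvM (pvWs words) ≤ 1 + (words.map (fun w => w.toList.length)).sum := by
    have h1 := pv_M_le_sum (pvWs words)
    have h2 : (pvWs words).map List.length = words.map (fun w => w.toList.length) := by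
      unfold pvWs
      rw [List.map_map]
      rfl
    rw [h2] at h1
    omega
  dsimp only
  rw [if_neg (lt_irrefl 0), add_zero]
  exact pv_prs_root (pvWs words) _ hM

-- ---------- A implementation = spec ----------

def aInnerD (length : Int) (wd : PySem.Dict Int (PySem.Dict String Int)) (p : String × Int) :
    PySem.Dict Int (PySem.Dict String Int) :=
  if (if 2 ≤ p.2 then p.2 - 2 else p.2) ≠ 0 then
    wd.modify (length - 1) PySem.Dict.empty
      (fun c => c.modify (PySem.Str.slice p.1 (some 1) none) 0
        (· + (if 2 ≤ p.2 then p.2 - 2 else p.2)))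
  else wd

-- the invariant carried down the outer loop, at outer level ℓ
def aWF (words : List String) (wd : PySem.Dict Int (PySem.Dict String Int)) (ℓ : Nat) : Prop :=
  ((wd.getD (ℓ : Int) PySem.Dict.empty).keys.Nodup ∧
   (∀ s ∈ (wd.getD (ℓ : Int) PySem.Dict.empty).keys, s.toList.length = ℓ) ∧
   (∀ s : String, (wd.getD (ℓ : Int) PySem.Dict.empty).getD s 0 =
      if s.toList.length = ℓ then pvV (pvWs words) s.toList else 0)) ∧
  (∀ j : Nat, 1 ≤ j → j < ℓ →
    (wd.getD (j : Int) PySem.Dict.empty).keys.Nodup ∧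
    (∀ s ∈ (wd.getD (j : Int) PySem.Dict.empty).keys, s.toList.length = j) ∧
    (∀ s : String, (wd.getD (j : Int) PySem.Dict.empty).getD s 0 =
       if s.toList.length = j then (words.count s : Int) else 0))

theorem pv_build_getD (words : List String) (l : List String)
    (wd : PySem.Dict Int (PySem.Dict String Int)) (L : Int) (s : String) :
    (((l.foldl aStep wd).getD L PySem.Dict.empty).getD s 0) =
      ((wd.getD L PySem.Dict.empty).getD s 0) +
      (if PySem.Str.len s = L then (l.count s : Int) else 0) := by
  induction l generalizing wd with
  | nil => simp
  | cons w t iht =>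
    simp only [List.foldl_cons]
    rw [iht (aStep wd w)]
    have hstep : ((aStep wd w).getD L PySem.Dict.empty).getD s 0 =
        (wd.getD L PySem.Dict.empty).getD s 0 +
          (if PySem.Str.len s = L ∧ s = w then 1 else 0) := by
      unfold aStep
      rw [PySem.Dict.getD_modify]
      by_cases hL : L = PySem.Str.len w
      · subst hL
        rw [if_pos rfl, PySem.Dict.getD_modify]
        by_cases hsw : s = w
        · subst hsw
          rw [if_pos rfl, if_pos ⟨rfl, rfl⟩]
        · rw [if_neg hsw, if_neg (fun hc => hsw hc.2), add_zero]
      · rw [if_neg hL,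
          if_neg (fun hc : PySem.Str.len s = L ∧ s = w => hL (by rw [← hc.1, hc.2])), add_zero]
    rw [hstep]
    have hcount : (if PySem.Str.len s = L then ((w :: t).count s : Int) else 0) =
        (if PySem.Str.len s = L then (t.count s : Int) else 0) +
          (if PySem.Str.len s = L ∧ s = w then 1 else 0) := by
      by_cases h1 : PySem.Str.len s = L
      · by_cases h2 : s = w
        · subst h2
          rw [if_pos h1, if_pos h1, if_pos ⟨h1, rfl⟩, List.count_cons_self]
          push_cast
          ring
        · rw [if_pos h1, if_pos h1, if_neg (fun hc => h2 hc.2),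
            List.count_cons_of_ne (fun he => h2 he.symm), add_zero]
      · rw [if_neg h1, if_neg h1, if_neg (fun hc => h1 hc.1), add_zero]
    rw [hcount]
    ring

theorem pv_build_keys (l : List String) (wd : PySem.Dict Int (PySem.Dict String Int))
    (h : ∀ L : Int, (wd.getD L PySem.Dict.empty).keys.Nodup ∧
          ∀ s ∈ (wd.getD L PySem.Dict.empty).keys, PySem.Str.len s = L) :
    ∀ L : Int, ((l.foldl aStep wd).getD L PySem.Dict.empty).keys.Nodup ∧
          ∀ s ∈ ((l.foldl aStep wd).getD L PySem.Dict.empty).keys, PySem.Str.len s = L := by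
  induction l generalizing wd with
  | nil => exact h
  | cons w t iht =>
    simp only [List.foldl_cons]
    refine iht (aStep wd w) (fun L => ?_)
    unfold aStep
    rw [PySem.Dict.getD_modify]
    by_cases hL : L = PySem.Str.len w
    · subst hL
      rw [if_pos rfl, PySem.Dict.keys_modify]
      by_cases hc : (wd.getD (PySem.Str.len w) PySem.Dict.empty).contains w
      · rw [PySem.Dict.keys_insert_of_contains _ _ hc]
        exact h (PySem.Str.len w)
      · rw [PySem.Dict.keys_insert_of_not_contains _ _ (by simpa using hc)]
        obtain ⟨hnd, hlen⟩ := h (PySem.Str.len w)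
        constructor
        · rw [List.nodup_append]
          refine ⟨hnd, List.nodup_singleton _, ?_⟩
          intro x hx y hy
          rw [List.mem_singleton] at hy
          subst hy
          exact fun he => absurd ((PySem.Dict.contains_iff_mem_keys _ _).mpr (he ▸ hx)) hc
        · intro s hs
          rcases List.mem_append.mp hs with hs | hs
          · exact hlen s hs
          · rw [List.mem_singleton.mp hs]
    · rw [if_neg hL]
      exact h L

theorem pv_inner_split (length : Int) (L : List (String × Int))
    (wd : PySem.Dict Int (PySem.Dict String Int)) (r : Int) :
    L.foldl (aInner length) (wd, r) =
      (L.foldl (aInnerD length) wd, r + (L.map (fun p => pvGain p.2)).sum) := by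
  induction L generalizing wd r with
  | nil => simp
  | cons p t iht =>
    simp only [List.foldl_cons]
    have hstep : aInner length (wd, r) p = (aInnerD length wd p, r + pvGain p.2) := by
      unfold aInner aInnerD pvGain
      by_cases h2 : 2 ≤ p.2
      · simp only [if_pos h2]
        split_ifs <;> rfl
      · simp only [if_neg h2]
        split_ifs <;> simp
    rw [hstep, iht]
    simp only [List.map_cons, List.sum_cons]
    exact Prod.ext rfl (by dsimp only; ring)

theorem pv_innerD_getD (length : Int) (L : List (String × Int))
    (wd : PySem.Dict Int (PySem.Dict String Int)) (t : String) :
    (((L.foldl (aInnerD length) wd).getD (length - 1) PySem.Dict.empty).getD t 0) =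
      (((wd.getD (length - 1) PySem.Dict.empty).getD t 0) +
        (L.map (fun p => if PySem.Str.slice p.1 (some 1) none = t then pvPos p.2 else 0)).sum) := by
  induction L generalizing wd with
  | nil => simp
  | cons p rest iht =>
    simp only [List.foldl_cons]
    rw [iht (aInnerD length wd p)]
    have hstep : (((aInnerD length wd p).getD (length - 1) PySem.Dict.empty).getD t 0) =
        ((wd.getD (length - 1) PySem.Dict.empty).getD t 0) +
          (if PySem.Str.slice p.1 (some 1) none = t then pvPos p.2 else 0) := by
      unfold aInnerD pvPos
      by_cases hz : (if 2 ≤ p.2 then p.2 - 2 else p.2) ≠ 0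
      · rw [if_pos hz, PySem.Dict.getD_modify, if_pos rfl, PySem.Dict.getD_modify]
        by_cases hs : t = PySem.Str.slice p.1 (some 1) none
        · rw [if_pos hs, if_pos hs.symm, hs]
        · rw [if_neg hs, if_neg (fun he => hs he.symm), add_zero]
      · rw [if_neg hz]
        push_neg at hz
        rw [hz]
        simp
    rw [hstep]
    simp only [List.map_cons, List.sum_cons]
    ring

theorem pv_innerD_getD_ne (length K : Int) (hK : K ≠ length - 1) (L : List (String × Int))
    (wd : PySem.Dict Int (PySem.Dict String Int)) :
    ((L.foldl (aInnerD length) wd).getD K PySem.Dict.empty) =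
      (wd.getD K PySem.Dict.empty) := by
  induction L generalizing wd with
  | nil => simp
  | cons p t iht =>
    simp only [List.foldl_cons]
    rw [iht (aInnerD length wd p)]
    unfold aInnerD
    by_cases hz : (if 2 ≤ p.2 then p.2 - 2 else p.2) ≠ 0
    · rw [if_pos hz, PySem.Dict.getD_modify, if_neg hK]
    · rw [if_neg hz]

theorem pv_innerD_keys (length : Int) (ℓ : Nat) (hl : 1 ≤ ℓ) (hL : length = (ℓ : Int))
    (L : List (String × Int)) (hkeys : ∀ p ∈ L, p.1.toList.length = ℓ)
    (wd : PySem.Dict Int (PySem.Dict String Int))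
    (h : ((wd.getD (length - 1) PySem.Dict.empty).keys.Nodup ∧
          ∀ s ∈ (wd.getD (length - 1) PySem.Dict.empty).keys, s.toList.length = ℓ - 1)) :
    ((L.foldl (aInnerD length) wd).getD (length - 1) PySem.Dict.empty).keys.Nodup ∧
      ∀ s ∈ ((L.foldl (aInnerD length) wd).getD (length - 1) PySem.Dict.empty).keys,
        s.toList.length = ℓ - 1 := by
  induction L generalizing wd with
  | nil => exact h
  | cons p t iht =>
    simp only [List.foldl_cons]
    refine iht (fun q hq => hkeys q (List.mem_cons_of_mem _ hq)) (aInnerD length wd p) ?_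
    unfold aInnerD
    by_cases hz : (if 2 ≤ p.2 then p.2 - 2 else p.2) ≠ 0
    case neg => rw [if_neg hz]; exact h
    rw [if_pos hz, PySem.Dict.getD_modify, if_pos rfl, PySem.Dict.keys_modify]
    by_cases hc : ((wd.getD (length - 1) PySem.Dict.empty)).contains
        (PySem.Str.slice p.1 (some 1) none) = true
    · rw [PySem.Dict.keys_insert_of_contains _ _ hc]
      exact h
    · rw [PySem.Dict.keys_insert_of_not_contains _ _ (by simpa using hc)]
      obtain ⟨hnd, hlens⟩ := h
      have hslice : (PySem.Str.slice p.1 (some 1) none).toList.length = ℓ - 1 := by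
        rw [PySem.Str.toList_slice]
        rw [show PySem.Chars.slice p.1.toList (some 1) none = p.1.toList.tail from
          PySem.List.slice_from_one p.1.toList]
        rw [List.length_tail]
        rw [hkeys p List.mem_cons_self]
      constructor
      · rw [List.nodup_append]
        refine ⟨hnd, List.nodup_singleton _, ?_⟩
        intro x hx y hy
        rw [List.mem_singleton] at hy
        subst hy
        exact fun he => absurd ((PySem.Dict.contains_iff_mem_keys _ _).mpr (he ▸ hx)) hc
      · intro s hs
        rcases List.mem_append.mp hs with hs | hs
        · exact hlens s hs
        · rw [List.mem_singleton.mp hs]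
          exact hslice

theorem pv_outer (words : List String) (ℓ : Nat) (hl : 1 ≤ ℓ)
    (wd : PySem.Dict Int (PySem.Dict String Int)) (r : Int) (hwf : aWF words wd ℓ) :
    ((PySem.List.pyRange (ℓ : Int) 0 (-1)).foldl aOuter (wd, r)).2 =
      r + ∑ t ∈ (pvSfx (pvWs words)).filter (fun t => t.length ≤ ℓ),
            pvGain (pvV (pvWs words) t) := by
  induction ℓ generalizing wd r with
  | zero => omega
  | succ k ihk =>
    have hrange : PySem.List.pyRange (((k+1 : Nat)) : Int) 0 (-1) =
        (((k+1 : Nat)) : Int) :: PySem.List.pyRange ((((k+1 : Nat)) : Int) - 1) 0 (-1) :=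
      PySem.List.pyRange_neg_one_cons (by exact_mod_cast Nat.succ_pos k)
    obtain ⟨⟨hnd, hklen, hgetD⟩, hlow⟩ := hwf
    have hitems := PySem.Dict.items_eq_map_keys
      (wd.getD (((k+1 : Nat)) : Int) PySem.Dict.empty) hnd (0 : Int)
    -- (A) the gain collected at level k+1
    have hgain : (((wd.getD (((k+1 : Nat)) : Int) PySem.Dict.empty).items.map
          (fun p => pvGain p.2)).sum) =
        ∑ t ∈ (pvSfx (pvWs words)).filter (fun t => t.length = k + 1),
          pvGain (pvV (pvWs words) t) := by
      rw [hitems, List.map_map]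
      rw [pv_sum_keys _ hnd]
      have himg : ∑ s ∈ (wd.getD (((k+1 : Nat)) : Int) PySem.Dict.empty).keys.toFinset,
            ((fun p : String × Int => pvGain p.2) ∘ fun q => (q, (wd.getD (((k+1 : Nat)) : Int) PySem.Dict.empty).getD q 0)) s =
          ∑ x ∈ ((wd.getD (((k+1 : Nat)) : Int) PySem.Dict.empty).keys.toFinset).image String.toList,
            pvGain (pvV (pvWs words) x) := by
        rw [Finset.sum_image (fun a _ b _ h => by
          have := congrArg String.ofList h
          simpa [String.ofList_toList] using this)]
        refine Finset.sum_congr rfl (fun s hs => ?_)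
        simp only [Function.comp_apply]
        rw [hgetD s]
        have := hklen s (List.mem_toFinset.mp hs)
        rw [if_pos this]
      rw [himg]
      refine pv_sum_support _ _ _ ?_ ?_
      · intro x hx hnx
        obtain ⟨s, hs, rfl⟩ := Finset.mem_image.mp hx
        have hlenx : s.toList.length = k + 1 := hklen s (List.mem_toFinset.mp hs)
        have hnsfx : s.toList ∉ pvSfx (pvWs words) := fun hmem =>
          hnx (Finset.mem_filter.mpr ⟨hmem, hlenx⟩)
        have hz : pvV (pvWs words) s.toList = 0 := by
          refine pv_cnt_vanish _ _ _ (fun w hw hsfx => hnsfx ?_)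
          exact (pv_mem_sfx _ _).mpr ⟨by intro he; rw [he] at hlenx; simp at hlenx, w, hw, hsfx⟩
        simp [hz, pvGain]
      · intro x hx hnx
        have hxf := Finset.mem_filter.mp hx
        have hz : pvV (pvWs words) x = 0 := by
          by_contra hnz
          have hcd := hgetD (String.ofList x)
          rw [String.toList_ofList, if_pos hxf.2] at hcd
          have hnc : (wd.getD (((k+1 : Nat)) : Int) PySem.Dict.empty).contains
              (String.ofList x) = false := by
            by_cases hcc : (wd.getD (((k+1 : Nat)) : Int) PySem.Dict.empty).contains
                (String.ofList x) = true
            · exfalso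
              apply hnx
              refine Finset.mem_image.mpr ⟨String.ofList x, ?_, String.toList_ofList⟩
              exact List.mem_toFinset.mpr ((PySem.Dict.contains_iff_mem_keys _ _).mp hcc)
            · simpa using hcc
          rw [PySem.Dict.getD_of_not_contains _ _ hnc] at hcd
          exact hnz hcd.symm
        simp [hz, pvGain]
    -- (B) the carry into level k
    have hcarry : ∀ hk : 1 ≤ k, aWF words
        ((wd.getD (((k+1 : Nat)) : Int) PySem.Dict.empty).items.foldl
          (aInnerD (((k+1 : Nat)) : Int)) wd) k := by
      intro hk
      have hcast : ((((k+1 : Nat)) : Int) - 1) = ((k : Nat) : Int) := by push_cast; ring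
      have hkeysarg : ∀ p ∈ (wd.getD (((k+1 : Nat)) : Int) PySem.Dict.empty).items,
          p.1.toList.length = k + 1 := by
        intro p hp
        rw [hitems] at hp
        obtain ⟨q, hq, rfl⟩ := List.mem_map.mp hp
        exact hklen q hq
      have hlowk := hlow k hk (by omega)
      constructor
      · refine ⟨?_, ?_, ?_⟩
        · have := (pv_innerD_keys (((k+1 : Nat)) : Int) (k+1) (by omega) rfl _ hkeysarg wd
            (by rw [hcast]; exact ⟨hlowk.1, fun s hs => hlowk.2.1 s hs⟩)).1
          rwa [hcast] at this
        · have := (pv_innerD_keys (((k+1 : Nat)) : Int) (k+1) (by omega) rfl _ hkeysarg wd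
            (by rw [hcast]; exact ⟨hlowk.1, fun s hs => hlowk.2.1 s hs⟩)).2
          rw [hcast] at this
          intro s hs
          have h2 := this s hs
          omega
        · intro t
          have hid := pv_innerD_getD (((k+1 : Nat)) : Int)
            (wd.getD (((k+1 : Nat)) : Int) PySem.Dict.empty).items wd t
          rw [hcast] at hid
          rw [hid, hlowk.2.2 t]
          by_cases hlt : t.toList.length = k
          · rw [if_pos hlt, if_pos hlt, pv_V_unfold]
            congr 1
            · simp only [pvWc]
              exact_mod_cast (pv_count_toList words t).symm
            · -- the carried sum equals the children sum
              rw [hitems, List.map_map, pv_sum_keys _ hnd]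
              have himg2 : ∑ s ∈ (wd.getD (((k+1 : Nat)) : Int) PySem.Dict.empty).keys.toFinset,
                    ((fun p : String × Int => if PySem.Str.slice p.1 (some 1) none = t
                        then pvPos p.2 else 0) ∘
                      fun q => (q, (wd.getD (((k+1 : Nat)) : Int) PySem.Dict.empty).getD q 0)) s =
                  ∑ c ∈ (pvChars (pvWs words)).image
                      (fun c => String.ofList (c :: t.toList)),
                    (if PySem.Str.slice c (some 1) none = t
                      then pvPos ((wd.getD (((k+1 : Nat)) : Int) PySem.Dict.empty).getD c 0) else 0) := by
                refine pv_sum_support _ _ _ ?_ ?_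
                · intro s hs hns
                  simp only [Function.comp_apply]
                  by_cases hsl : PySem.Str.slice s (some 1) none = t
                  case neg => rw [if_neg hsl]
                  rw [if_pos hsl]
                  have hlens : s.toList.length = k + 1 := hklen s (List.mem_toFinset.mp hs)
                  have hcons : s.toList = s.toList.headI :: t.toList := by
                    have htl : s.toList.tail = t.toList := by
                      have := congrArg String.toList hsl
                      rw [PySem.Str.toList_slice] at this
                      rw [show PySem.Chars.slice s.toList (some 1) none = s.toList.tail from
                        PySem.List.slice_from_one s.toList] at this
                      exact this
                    cases hsc : s.toList with
                    | nil => rw [hsc] at hlens; simp at hlens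
                    | cons a as =>
                      rw [hsc] at htl
                      simp only [List.tail_cons] at htl
                      rw [htl]
                      simp
                  have hz : pvV (pvWs words) s.toList = 0 := by
                    refine pv_cnt_vanish _ _ _ (fun w hw hsfx => ?_)
                    have hcin : s.toList.headI ∈ pvChars (pvWs words) := by
                      refine pv_mem_chars _ _ t.toList w hw ?_
                      rw [← hcons]
                      exact hsfx
                    apply hns
                    refine Finset.mem_image.mpr ⟨s.toList.headI, hcin, ?_⟩
                    rw [← hcons, String.ofList_toList]
                  rw [hgetD s, if_pos hlens, hz]
                  simp [pvPos]
                · intro s hs hns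
                  obtain ⟨c, _, rfl⟩ := Finset.mem_image.mp hs
                  simp only [Function.comp_apply]
                  have hsl : PySem.Str.slice (String.ofList (c :: t.toList)) (some 1) none = t := by
                    have h1 : (PySem.Str.slice (String.ofList (c :: t.toList)) (some 1) none).toList
                        = t.toList := by
                      rw [PySem.Str.toList_slice]
                      rw [show PySem.Chars.slice (String.ofList (c :: t.toList)).toList (some 1) none
                          = (String.ofList (c :: t.toList)).toList.tail from
                        PySem.List.slice_from_one _]
                      rw [String.toList_ofList]
                      rfl
                    have := congrArg String.ofList h1
                    rwa [String.ofList_toList, String.ofList_toList] at this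
                  rw [if_pos hsl]
                  have hnc : (wd.getD (((k+1 : Nat)) : Int) PySem.Dict.empty).contains
                      (String.ofList (c :: t.toList)) = false := by
                    by_cases hcc : (wd.getD (((k+1 : Nat)) : Int) PySem.Dict.empty).contains
                        (String.ofList (c :: t.toList)) = true
                    · exact absurd (List.mem_toFinset.mpr
                        ((PySem.Dict.contains_iff_mem_keys _ _).mp hcc)) hns
                    · simpa using hcc
                  rw [PySem.Dict.getD_of_not_contains _ _ hnc]
                  simp [pvPos]
              rw [himg2]
              rw [Finset.sum_image (fun a _ b _ h => by
                have := congrArg String.toList h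
                rw [String.toList_ofList, String.toList_ofList] at this
                injection this)]
              refine Finset.sum_congr rfl (fun c _ => ?_)
              have hsl : PySem.Str.slice (String.ofList (c :: t.toList)) (some 1) none = t := by
                have h1 : (PySem.Str.slice (String.ofList (c :: t.toList)) (some 1) none).toList
                    = t.toList := by
                  rw [PySem.Str.toList_slice]
                  rw [show PySem.Chars.slice (String.ofList (c :: t.toList)).toList (some 1) none
                      = (String.ofList (c :: t.toList)).toList.tail from
                    PySem.List.slice_from_one _]
                  rw [String.toList_ofList]
                  rfl
                have := congrArg String.ofList h1
                rwa [String.ofList_toList, String.ofList_toList] at this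
              rw [if_pos hsl, hgetD (String.ofList (c :: t.toList))]
              rw [String.toList_ofList]
              rw [if_pos (by simp [hlt])]
          · rw [if_neg hlt, if_neg hlt]
            rw [hitems, List.map_map]
            have hzero : ∀ p ∈ ((wd.getD (((k+1 : Nat)) : Int) PySem.Dict.empty).keys.map
                (fun q => (q, (wd.getD (((k+1 : Nat)) : Int) PySem.Dict.empty).getD q 0))).map
                  (fun p : String × Int => if PySem.Str.slice p.1 (some 1) none = t
                    then pvPos p.2 else 0), p = 0 := by
              intro v hv
              obtain ⟨p, hp, rfl⟩ := List.mem_map.mp hv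
              obtain ⟨q, hq, rfl⟩ := List.mem_map.mp hp
              by_cases hsl : PySem.Str.slice q (some 1) none = t
              · exfalso
                have hlens : q.toList.length = k + 1 := hklen q hq
                have htl : q.toList.tail = t.toList := by
                  have := congrArg String.toList hsl
                  rw [PySem.Str.toList_slice] at this
                  rw [show PySem.Chars.slice q.toList (some 1) none = q.toList.tail from
                    PySem.List.slice_from_one q.toList] at this
                  exact this
                have : t.toList.length = k := by
                  rw [← htl, List.length_tail, hlens]
                  omega
                exact hlt this
              · rw [if_neg hsl]
            rw [List.map_map] at hzero
            rw [List.sum_eq_zero hzero, add_zero]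
      · intro j hj1 hjk
        have hne : ((j : Nat) : Int) ≠ (((k+1 : Nat)) : Int) - 1 := by
          push_cast
          omega
        rw [pv_innerD_getD_ne _ _ hne]
        exact hlow j hj1 (by omega)
    -- assemble
    rw [hrange, List.foldl_cons,
      show aOuter (wd, r) (((k+1 : Nat)) : Int) =
        ((wd.getD (((k+1 : Nat)) : Int) PySem.Dict.empty).items.foldl
          (aInner (((k+1 : Nat)) : Int)) (wd, r)) from rfl,
      pv_inner_split]
    have hsum_split : ∑ t ∈ (pvSfx (pvWs words)).filter (fun t => t.length ≤ k + 1),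
          pvGain (pvV (pvWs words) t) =
        (∑ t ∈ (pvSfx (pvWs words)).filter (fun t => t.length = k + 1),
          pvGain (pvV (pvWs words) t)) +
        (∑ t ∈ (pvSfx (pvWs words)).filter (fun t => t.length ≤ k),
          pvGain (pvV (pvWs words) t)) := by
      rw [← Finset.sum_filter_add_sum_filter_not
        ((pvSfx (pvWs words)).filter (fun t => t.length ≤ k + 1)) (fun t => t.length = k + 1)]
      congr 1
      · congr 1
        rw [Finset.filter_filter]
        refine Finset.filter_congr (fun t _ => ?_)
        constructor
        · rintro ⟨_, h⟩; exact h
        · intro h; exact ⟨by omega, h⟩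
      · congr 1
        rw [Finset.filter_filter]
        refine Finset.filter_congr (fun t _ => ?_)
        constructor
        · rintro ⟨h1, h2⟩; omega
        · intro h; exact ⟨by omega, by omega⟩
    rcases Nat.eq_zero_or_pos k with hk | hk
    · subst hk
      have hnil : PySem.List.pyRange ((((0+1 : Nat)) : Int) - 1) 0 (-1) = [] := by
        rw [show ((((0+1 : Nat)) : Int) - 1) = 0 by norm_num]
        exact PySem.List.pyRange_neg_one_eq_nil le_rfl
      rw [hnil]
      simp only [List.foldl_nil]
      rw [hgain, hsum_split]
      have hemp : (pvSfx (pvWs words)).filter (fun t => t.length ≤ 0) = ∅ := by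
        refine Finset.filter_eq_empty_iff.mpr (fun t ht hle => ?_)
        have h1 := ((pv_mem_sfx _ _).mp ht).1
        have h2 : 0 < t.length := List.length_pos_iff.mpr h1
        omega
      rw [hemp, Finset.sum_empty, add_zero]
    · have hcast : ((((k+1 : Nat)) : Int) - 1) = ((k : Nat) : Int) := by push_cast; ring
      rw [hcast, ihk hk _ _ (hcarry hk), hgain, hsum_split]
      ring

theorem pv_a_eq_spec (N : Int) (words : List String) (h : words ≠ []) :
    largest_subset_size N words = pvSpec (pvWs words) := by
  cases words with
  | nil => exact absurd rfl h
  | cons w t =>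
    have hmaxfold : ∀ (l : List String) (a : Nat),
        List.foldl max ((a : Nat) : Int) (l.map (fun w => PySem.Str.len w)) =
          (((l.map String.toList).foldl (fun acc x => max acc x.length) a : Nat) : Int) := by
      intro l
      induction l with
      | nil => intro a; simp
      | cons x xs ih =>
        intro a
        simp only [List.map_cons, List.foldl_cons]
        rw [show max ((a : Nat) : Int) (PySem.Str.len x) = ((max a x.toList.length : Nat) : Int) by
          rw [PySem.Str.len_eq]; push_cast; rfl]
        exact ih _
    have hmax : PySem.List.max? ((w :: t).map (fun w => PySem.Str.len w)) (fun x => x) =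
        some ((pvM (pvWs (w :: t)) : Int)) := by
      rw [List.map_cons, PySem.List.max?_id_cons]
      congr 1
      rw [PySem.Str.len_eq w, hmaxfold t w.toList.length]
      congr 1
    simp only [largest_subset_size]
    rw [hmax]
    dsimp only
    have hbase : ∀ (L : Int) (s : String),
        (((PySem.Dict.empty : PySem.Dict Int (PySem.Dict String Int)).getD L
          PySem.Dict.empty).getD s 0) = 0 := by
      intro L s
      rw [PySem.Dict.getD_empty, PySem.Dict.getD_empty]
    have hbkeys := pv_build_keys (w :: t) PySem.Dict.empty (by
      intro L
      rw [PySem.Dict.getD_empty, PySem.Dict.keys_empty]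
      exact ⟨List.nodup_nil, fun s hs => absurd hs (List.not_mem_nil)⟩)
    have hbget : ∀ (L : Int) (s : String),
        ((((w :: t).foldl aStep PySem.Dict.empty).getD L PySem.Dict.empty).getD s 0) =
          (if PySem.Str.len s = L then ((w :: t).count s : Int) else 0) := by
      intro L s
      rw [pv_build_getD (w :: t) (w :: t) PySem.Dict.empty L s, hbase, zero_add]
    rcases Nat.eq_zero_or_pos (pvM (pvWs (w :: t))) with hM | hM
    · rw [hM]
      rw [show ((0 : Nat) : Int) = 0 from rfl, PySem.List.pyRange_neg_one_eq_nil le_rfl]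
      simp only [List.foldl_nil]
      have hemp : pvSfx (pvWs (w :: t)) = ∅ := by
        refine Finset.eq_empty_of_forall_notMem (fun x hx => ?_)
        obtain ⟨hne, w', hw', hsfx⟩ := (pv_mem_sfx _ _).mp hx
        have h1 : 0 < x.length := List.length_pos_iff.mpr hne
        have h2 := hsfx.length_le
        have h3 := pv_len_le_M _ w' hw'
        omega
      unfold pvSpec
      rw [hemp, Finset.sum_empty]
    · have hv_top : ∀ sL : List Char, sL.length = pvM (pvWs (w :: t)) →
          pvV (pvWs (w :: t)) sL = pvWc (pvWs (w :: t)) sL := by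
        intro sL hsl
        rw [pv_V_unfold, Finset.sum_eq_zero, add_zero]
        intro c _
        have hz : pvV (pvWs (w :: t)) (c :: sL) = 0 := by
          refine pv_cnt_vanish _ _ _ (fun w' hw' hsfx => ?_)
          have h2 := hsfx.length_le
          have h3 := pv_len_le_M _ w' hw'
          simp only [List.length_cons] at h2
          omega
        rw [hz]
        simp [pvPos]
      have hlen_iff : ∀ (s : String) (j : Nat),
          (PySem.Str.len s = (j : Int)) ↔ s.toList.length = j := by
        intro s j
        rw [PySem.Str.len_eq]
        exact_mod_cast Iff.rfl
      have hwf : aWF (w :: t) ((w :: t).foldl aStep PySem.Dict.empty)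
          (pvM (pvWs (w :: t))) := by
        constructor
        · refine ⟨(hbkeys ((pvM (pvWs (w :: t)) : Int))).1, fun s hs => ?_, fun s => ?_⟩
          · exact (hlen_iff s _).mp ((hbkeys _).2 s hs)
          · rw [hbget _ s]
            by_cases hls : s.toList.length = pvM (pvWs (w :: t))
            · rw [if_pos ((hlen_iff s _).mpr hls), if_pos hls, hv_top s.toList hls]
              simp only [pvWc]
              exact_mod_cast (congrArg (Nat.cast : Nat → Int) (pv_count_toList (w :: t) s)).symm
            · rw [if_neg (fun hc => hls ((hlen_iff s _).mp hc)), if_neg hls]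
        · intro j hj1 hjM
          refine ⟨(hbkeys _).1, fun s hs => (hlen_iff s _).mp ((hbkeys _).2 s hs), fun s => ?_⟩
          rw [hbget _ s]
          by_cases hls : s.toList.length = j
          · rw [if_pos ((hlen_iff s _).mpr hls), if_pos hls]
          · rw [if_neg (fun hc => hls ((hlen_iff s _).mp hc)), if_neg hls]
      rw [pv_outer (w :: t) (pvM (pvWs (w :: t))) hM _ 0 hwf, zero_add]
      unfold pvSpec
      congr 1
      refine Finset.filter_true_of_mem (fun x hx => ?_)
      obtain ⟨hne, w', hw', hsfx⟩ := (pv_mem_sfx _ _).mp hx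
      have h2 := hsfx.length_le
      have h3 := pv_len_le_M _ w' hw'
      omega

-- ===== VERDICT (by name: the statement is the Claim_ definition above) =====
theorem largest_subset_size_spec : Claim_equal_largest_subset_size := by
  intro N words _ hpre
  unfold Spec_largest_subset_size
  rw [pv_a_eq_spec N words hpre, pv_alt_eq_spec N words]
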